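-- pv_equiv track=rewrite | github.com/complexhhs/Baekjoon_solution | 2775.py | check_people
-- ===== SOURCE A (Python) =====
-- def check_people(h,w):
-- 	aux=[1 for i in range(w)]
-- 	for ih in range(h+1):
-- 		for iw in range(w):
-- 			if iw == 0:
-- 				aux[iw]=1
-- 			else:
-- 				aux[iw] = aux[iw-1]+aux[iw]
-- 	return aux[iw]
-- ===== SOURCE B (Python) =====
-- def check_people(h, w):
--     # Closed-form: the value is the binomial coefficient C(h+w, w-1),
--     # computed as a running product in O(w) instead of A's O(h*w) table.
--     r = 1
--     for i in range(1, w):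
--         r = r * (h + 1 + i) // i
--     return r
-- ===== Notes on version B (the rewrite author's own statement) =====
-- stated objective: faster
-- what changed: Replaced A's in-place Pascal-triangle table built with h+1 prefix-sum passes over a width-w row by the closed-form running product for the binomial coefficient C(h+w, w-1), computed with one O(w) loop of exact multiply-divide steps.
import Mathlib
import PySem

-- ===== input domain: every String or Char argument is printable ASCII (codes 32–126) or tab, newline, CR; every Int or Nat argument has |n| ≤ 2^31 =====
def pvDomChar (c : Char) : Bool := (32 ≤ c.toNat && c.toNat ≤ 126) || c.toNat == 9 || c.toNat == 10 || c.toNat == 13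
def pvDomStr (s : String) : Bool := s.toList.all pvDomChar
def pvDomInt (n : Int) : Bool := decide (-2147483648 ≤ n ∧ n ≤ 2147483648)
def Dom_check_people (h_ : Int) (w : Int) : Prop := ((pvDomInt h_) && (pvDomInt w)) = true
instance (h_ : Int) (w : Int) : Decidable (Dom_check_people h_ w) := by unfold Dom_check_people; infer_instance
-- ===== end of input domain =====

-- B replaces A's in-place Pascal-triangle table of h*w additions with the closed-form
-- running-product computation of the binomial coefficient C(h+w, w-1) in w steps (objective: faster).


-- ===== PORT A =====
def check_people (h_ : Int) (w : Int) : Int :=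
  -- aux is an Array so that aux[iw] = … updates in O(1), like Python's list; every index
  -- the loops produce is a range value ≥ 0, so .toNat is exact here (no negative indices).
  let aux0 : Array Int := ((PySem.List.pyRange 0 w 1).map (fun _ => (1 : Int))).toArray   -- aux=[1 for i in range(w)]
  let aux := (PySem.List.pyRange 0 (h_ + 1) 1).foldl (fun aux _ih =>
      (PySem.List.pyRange 0 w 1).foldl (fun aux iw =>
        if iw = 0 then aux.setIfInBounds iw.toNat 1
        else aux.setIfInBounds iw.toNat (aux.getD (iw - 1).toNat 0 + aux.getD iw.toNat 0)) aux) aux0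
  -- Python returns aux[iw], iw being the leftover inner-loop variable; under Pre_ both
  -- loops ran, so its value is w - 1 (outside Pre_ the Python raises UnboundLocalError).
  aux.getD (w - 1).toNat 0

-- ===== PORT B =====
def check_people_alt (h_ : Int) (w : Int) : Int :=
  (PySem.List.pyRange 1 w 1).foldl (fun r i => PySem.Int.floordiv (r * (h_ + 1 + i)) i) 1

-- ===== PRECONDITION & SPEC =====
-- Pre_ excludes exactly the inputs where A raises UnboundLocalError (h < 0 or w < 1:
-- a loop body never runs and the leftover loop variable iw is read while unbound).
def Pre_check_people (h_ : Int) (w : Int) : Prop := 0 ≤ h_ ∧ 1 ≤ w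
instance (h_ : Int) (w : Int) : Decidable (Pre_check_people h_ w) := by unfold Pre_check_people; infer_instance

def pvWitness_check_people : Int × Int := (3, 4)

def Spec_check_people (h_ : Int) (w : Int) (out : Int) : Prop := out = check_people_alt h_ w
instance (h_ : Int) (w : Int) (out : Int) : Decidable (Spec_check_people h_ w out) := by unfold Spec_check_people; infer_instance

-- ===== CLAIM (what is proved, stated in full; the proofs are below) =====
def Claim_equal_check_people : Prop := ∀ (h_ : Int) (w : Int), Dom_check_people h_ w → Pre_check_people h_ w → Spec_check_people h_ w (check_people h_ w)

-- ===== LEMMAS AND PROOFS =====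

-- the row of Pascal values after k prefix-sum passes over a width-W row of ones
def pvRow (k W : Nat) : List Int := (List.range W).map (fun j => ((k + j).choose j : Int))

-- the row in the middle of a pass taking pvRow k to pvRow (k+1): indices < i already updated
def pvMixed (k W i : Nat) : List Int :=
  (List.range W).map (fun j => if j < i then ((k + 1 + j).choose j : Int) else ((k + j).choose j : Int))

-- B's running product maintains a binomial coefficient
theorem b_fold (h_ : Int) (hh : 0 ≤ h_) (k : Nat) :
    (PySem.List.pyRange 1 (1 + k) 1).foldl
      (fun r i => PySem.Int.floordiv (r * (h_ + 1 + i)) i) 1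
      = ((h_.toNat + 1 + k).choose k : Int) := by
  induction k with
  | zero => simp [PySem.List.pyRange_one_eq_nil]
  | succ k ih =>
    have h1 : (1 : Int) ≤ 1 + k := by omega
    have hsplit : (1 + (k+1 : Nat) : Int) = (1 + (k:Int)) + 1 := by push_cast; ring
    rw [hsplit, PySem.List.pyRange_one_succ_right h1, List.foldl_append, ih]
    simp only [List.foldl_cons, List.foldl_nil]
    have hcast : h_ = (h_.toNat : Int) := (Int.toNat_of_nonneg hh).symm
    set H := h_.toNat with hH
    set A := H + 1 + k with hA
    have key : (A + 1) * A.choose k = (A + 1).choose (k+1) * (k+1) := Nat.add_one_mul_choose_eq A k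
    have harg : ((A).choose k : Int) * (h_ + 1 + (1 + k)) = (((A + 1).choose (k+1) * (k+1) : Nat) : Int) := by
      rw [hcast, ← key, hA]; push_cast; ring
    rw [harg]
    have h2 : ((1:Int) + k) = ((k+1 : Nat) : Int) := by push_cast; ring
    rw [h2, PySem.Int.floordiv_natCast, Nat.mul_div_cancel _ (by omega)]
    have e : H + 1 + (k+1) = A + 1 := by omega
    rw [e]

-- A's inner loop: a left-to-right in-place prefix-sum pass, element by element
theorem a_inner (k W : Nat) : ∀ i : Nat, i ≤ W →
    (PySem.List.pyRange 0 (i : Int) 1).foldl (fun aux iw =>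
        if iw = 0 then PySem.List.pySetD aux iw 1
        else PySem.List.pySetD aux iw
              (PySem.List.pyGetD aux (iw - 1) 0 + PySem.List.pyGetD aux iw 0)) (pvRow k W)
      = pvMixed k W i := by
  intro i
  induction i with
  | zero =>
    intro _
    simp [PySem.List.pyRange_one_eq_nil, pvRow, pvMixed]
  | succ i ih =>
    intro hle
    have hsplit : ((i+1 : Nat) : Int) = (i : Int) + 1 := by push_cast; ring
    rw [hsplit, PySem.List.pyRange_one_succ_right (by positivity), List.foldl_append, ih (by omega)]
    simp only [List.foldl_cons, List.foldl_nil]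
    have hiW : i < W := by omega
    by_cases hi0 : i = 0
    · subst hi0
      simp only [Nat.cast_zero]
      rw [show ((0:Int)) = ((0:Nat) : Int) from rfl, PySem.List.pySetD_natCast]
      apply List.ext_getElem
      · simp [pvMixed]
      · intro j hj1 hj2
        simp [pvMixed, List.getElem_set, List.getElem_map, List.getElem_range]
        rcases Nat.eq_zero_or_pos j with h | h
        · subst h; simp
        · rw [if_neg (by omega), if_neg (by omega)]
    · obtain ⟨m, rfl⟩ : ∃ m, i = m + 1 := ⟨i - 1, by omega⟩
      have hne : (((m+1 : Nat)):Int) ≠ 0 := by push_cast; omega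
      rw [if_neg hne]
      have him : (((m+1:Nat)):Int) - 1 = ((m : Nat) : Int) := by push_cast; omega
      rw [him, PySem.List.pyGetD_natCast, PySem.List.pyGetD_natCast, PySem.List.pySetD_natCast]
      have hlen : m < (pvMixed k W (m+1)).length := by simp [pvMixed]; omega
      have hlen2 : m + 1 < (pvMixed k W (m+1)).length := by simp [pvMixed]; omega
      rw [List.getD_eq_getElem _ _ hlen, List.getD_eq_getElem _ _ hlen2]
      have e1 : (pvMixed k W (m+1))[m]'hlen = ((k + m + 1).choose m : Int) := by
        simp only [pvMixed, List.getElem_map, List.getElem_range]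
        rw [if_pos (by omega)]
        congr 2
        omega
      have e2 : (pvMixed k W (m+1))[m+1]'hlen2 = ((k + m + 1).choose (m+1) : Int) := by
        simp only [pvMixed, List.getElem_map, List.getElem_range]
        rw [if_neg (by omega), show k + (m+1) = k + m + 1 from by omega]
      rw [e1, e2]
      apply List.ext_getElem
      · simp [pvMixed]
      · intro j hj1 hj2
        simp only [pvMixed, List.getElem_set, List.getElem_map, List.getElem_range]
        by_cases hji : j = m + 1
        · subst hji
          rw [if_pos rfl, if_pos (by omega)]
          have hp := Nat.choose_succ_succ (k+m+1) m
          have e3 : k + 1 + (m+1) = k + m + 1 + 1 := by omega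
          rw [e3]
          exact_mod_cast hp.symm
        · rw [if_neg (fun h => hji h.symm)]
          by_cases hlt : j < m + 1
          · rw [if_pos hlt, if_pos (by omega)]
          · rw [if_neg hlt, if_neg (by omega)]

-- a completed pass is the next Pascal row
theorem pvMixed_full (k W : Nat) : pvMixed k W W = pvRow (k+1) W := by
  apply List.map_congr_left
  intro j hj
  rw [if_pos (List.mem_range.mp hj)]

-- the initial row of ones is Pascal row 0
theorem pvRow_zero (W : Nat) :
    (PySem.List.pyRange 0 (W:Int) 1).map (fun _ => (1 : Int)) = pvRow 0 W := by
  rw [PySem.List.pyRange_one]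
  simp only [pvRow, List.map_map]
  apply List.map_congr_left
  intro j _
  simp

-- A's outer loop iterates the pass
theorem a_outer (W : Nat) : ∀ m : Nat,
    (PySem.List.pyRange 0 (m : Int) 1).foldl (fun aux _ih =>
      (PySem.List.pyRange 0 (W:Int) 1).foldl (fun aux iw =>
        if iw = 0 then PySem.List.pySetD aux iw 1
        else PySem.List.pySetD aux iw
              (PySem.List.pyGetD aux (iw - 1) 0 + PySem.List.pyGetD aux iw 0)) aux) (pvRow 0 W)
      = pvRow m W := by
  intro m
  induction m with
  | zero => simp [PySem.List.pyRange_one_eq_nil]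
  | succ m ih =>
    have hsplit : ((m+1 : Nat) : Int) = (m : Int) + 1 := by push_cast; ring
    rw [hsplit, PySem.List.pyRange_one_succ_right (by positivity), List.foldl_append, ih]
    simp only [List.foldl_cons, List.foldl_nil]
    rw [a_inner m W W le_rfl, pvMixed_full]


-- Array.getD reads through toList
theorem pvArrGetD (a : Array Int) (n : Nat) (d : Int) : a.getD n d = a.toList.getD n d := by
  unfold Array.getD
  split
  · rw [List.getD_eq_getElem _ _ (by simpa using ‹_›)]; simp
  · rw [List.getD_eq_default _ _ (by simpa using Nat.le_of_not_lt ‹_›)]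

-- the Array form of A's inner loop computes, through toList, the pySetD/pyGetD List form
theorem pv_inner_bridge (idxs : List Int) (hpos : ∀ x ∈ idxs, 0 ≤ x) (a : Array Int) :
    (idxs.foldl (fun aux iw =>
        if iw = 0 then aux.setIfInBounds iw.toNat 1
        else aux.setIfInBounds iw.toNat (aux.getD (iw - 1).toNat 0 + aux.getD iw.toNat 0)) a).toList
    = idxs.foldl (fun aux iw =>
        if iw = 0 then PySem.List.pySetD aux iw 1
        else PySem.List.pySetD aux iw
              (PySem.List.pyGetD aux (iw - 1) 0 + PySem.List.pyGetD aux iw 0)) a.toList := by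
  induction idxs generalizing a with
  | nil => rfl
  | cons x xs ih =>
    have hx : 0 ≤ x := hpos x (by simp)
    rw [List.foldl_cons, List.foldl_cons, ih (fun y hy => hpos y (by simp [hy]))]
    congr 1
    by_cases h0 : x = 0
    · subst h0
      rw [if_pos rfl, if_pos rfl, Array.toList_setIfInBounds, PySem.List.pySetD_of_nonneg _ _ le_rfl]
    · rw [if_neg h0, if_neg h0, Array.toList_setIfInBounds,
          PySem.List.pySetD_of_nonneg _ _ hx, pvArrGetD, pvArrGetD,
          PySem.List.pyGetD_of_nonneg _ _ hx, PySem.List.pyGetD_of_nonneg _ _ (by omega)]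

-- the same for the outer loop
theorem pv_outer_bridge (w : Int) (outer : List Int) (a : Array Int) :
    (outer.foldl (fun aux _ih =>
      (PySem.List.pyRange 0 w 1).foldl (fun aux iw =>
        if iw = 0 then aux.setIfInBounds iw.toNat 1
        else aux.setIfInBounds iw.toNat (aux.getD (iw - 1).toNat 0 + aux.getD iw.toNat 0)) aux) a).toList
    = outer.foldl (fun aux _ih =>
      (PySem.List.pyRange 0 w 1).foldl (fun aux iw =>
        if iw = 0 then PySem.List.pySetD aux iw 1
        else PySem.List.pySetD aux iw
              (PySem.List.pyGetD aux (iw - 1) 0 + PySem.List.pyGetD aux iw 0)) aux) a.toList := by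
  induction outer generalizing a with
  | nil => rfl
  | cons x xs ih =>
    rw [List.foldl_cons, List.foldl_cons, ← pv_inner_bridge _
      (fun y hy => (PySem.List.mem_pyRange_one.mp hy).1), ih]

-- ===== VERDICT (by name: the statement is the Claim_ definition above) =====
theorem check_people_spec : Claim_equal_check_people := by
  intro h_ w hdom hpre
  obtain ⟨hh, hw⟩ := hpre
  unfold Spec_check_people check_people check_people_alt
  obtain ⟨W, rfl⟩ : ∃ W : Nat, w = (W : Int) := ⟨w.toNat, by omega⟩
  have hW : 1 ≤ W := by exact_mod_cast hw
  simp only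
  conv_rhs => rw [show (W : Int) = 1 + ((W - 1 : Nat) : Int) from by omega, b_fold h_ hh (W-1)]
  rw [pvArrGetD, pv_outer_bridge, List.toList_toArray, pvRow_zero W]
  have hh1 : h_ + 1 = ((h_.toNat + 1 : Nat) : Int) := by omega
  rw [hh1, a_outer W]
  rw [show ((W : Int) - 1).toNat = W - 1 from by omega]
  have hlen : W - 1 < (pvRow (h_.toNat + 1) W).length := by simp [pvRow]; omega
  rw [List.getD_eq_getElem _ _ hlen]
  simp only [pvRow, List.getElem_map, List.getElem_range]
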